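-- pv_equiv track=rewrite | github.com/matijapretnar/programiranje-1 | izpiti/2021-01-20/naloga3.py | rozle_tocki_pametno
-- ===== SOURCE A (Python) =====
-- def rozle_tocki_pametno(xs):
--     # O(n)
--
--     cummin = []
--     opt_min = xs[0]
--     opt_i = 0
--     for k, x in enumerate(xs):
--         if x < opt_min:
--             opt_min = x
--             opt_i = k
--         cummin.append((opt_min, opt_i))
--
--     options = [(x - opt_min, k, i) for ((i, x), (opt_min, k)) in
--                zip(enumerate(xs), cummin)]
--
--     val, i, j = max(options)
--     return i, j
-- ===== SOURCE B (Python) =====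
-- def rozle_tocki_pametno(xs):
--     # Single pass: fuse the cumulative-minimum table, the options list and max
--     # into one loop carrying (running min, its index, best triple so far).
--     opt_min, opt_i, best = xs[0], 0, None
--     for i, x in enumerate(xs):
--         if x < opt_min:
--             opt_min, opt_i = x, i
--         cand = (x - opt_min, opt_i, i)
--         if best is None or cand > best:
--             best = cand
--     _, k, j = best
--     return k, j
-- ===== Notes on version B (the rewrite author's own statement) =====
-- stated objective: faster
-- what changed: A builds a cumulative-minimum table, then a full options list, then calls max; B fuses all three into one single pass carrying (running min, its index, best triple so far), allocating no intermediate lists.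
import Mathlib
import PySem

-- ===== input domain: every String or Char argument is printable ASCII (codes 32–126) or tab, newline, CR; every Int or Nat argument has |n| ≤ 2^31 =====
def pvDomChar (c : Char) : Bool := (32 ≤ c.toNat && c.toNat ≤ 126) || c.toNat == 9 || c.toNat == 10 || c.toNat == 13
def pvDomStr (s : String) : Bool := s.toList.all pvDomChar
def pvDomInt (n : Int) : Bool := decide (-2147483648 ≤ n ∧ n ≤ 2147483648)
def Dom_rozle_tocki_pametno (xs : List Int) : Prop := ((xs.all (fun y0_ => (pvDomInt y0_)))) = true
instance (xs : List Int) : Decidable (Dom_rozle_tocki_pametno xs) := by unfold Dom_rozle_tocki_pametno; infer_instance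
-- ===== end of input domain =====

-- B fuses A's three passes (cumulative-minimum table, options list, max) into one fold;
-- same return value on every non-empty list (empty input raises IndexError in both).

-- Python's `<` on 3-tuples of ints: lexicographic (shared helper of both ports; exact)
def triLt (a b : Int × Int × Int) : Bool :=
  decide (a.1 < b.1) ||
    (decide (a.1 = b.1) &&
      (decide (a.2.1 < b.2.1) || (decide (a.2.1 = b.2.1) && decide (a.2.2 < b.2.2))))

-- ===== PORT A =====
-- loop body of A's first pass: update (opt_min, opt_i), append to cummin
def stepA (s : Int × Int × List (Int × Int)) (kx : Int × Int) :
    Int × Int × List (Int × Int) :=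
  let mi := if kx.2 < s.1 then (kx.2, kx.1) else (s.1, s.2.1)
  (mi.1, mi.2, s.2.2 ++ [mi])

def rozle_tocki_pametno (xs : List Int) : Int × Int :=
  match xs with
  | [] => (0, 0)       -- Python raises IndexError here (first-element read); excluded by Pre_
  | x0 :: t =>
    let st := (PySem.List.enumerate (x0 :: t)).foldl stepA (x0, 0, [])
    let options := ((PySem.List.enumerate (x0 :: t)).zip st.2.2).map
      (fun p => (p.1.2 - p.2.1, p.2.2, p.1.1))
    -- max(options): hand port of Python's max on int 3-tuples (lexicographic,
    -- first maximal element kept: replace only on strict `>`) — exact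
    match options with
    | [] => (0, 0)     -- unreachable: options is nonempty when xs is
    | o :: rest =>
      let best := rest.foldl (fun b c => if triLt b c then c else b) o
      (best.2.1, best.2.2)

-- ===== PORT B =====
-- loop body of B's single pass: update (opt_min, opt_i), fold the candidate into best
def stepB (s : Int × Int × Option (Int × Int × Int)) (ix : Int × Int) :
    Int × Int × Option (Int × Int × Int) :=
  let mk := if ix.2 < s.1 then (ix.2, ix.1) else (s.1, s.2.1)
  let cand := (ix.2 - mk.1, mk.2, ix.1)
  let best := match s.2.2 with
    | none => some cand
    | some b => if triLt b cand then some cand else some b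
  (mk.1, mk.2, best)

def rozle_tocki_pametno_alt (xs : List Int) : Int × Int :=
  match xs with
  | [] => (0, 0)       -- Python raises IndexError here (first-element read); excluded by Pre_
  | x0 :: t =>
    let st := (PySem.List.enumerate (x0 :: t)).foldl stepB (x0, 0, none)
    match st.2.2 with
    | some b => (b.2.1, b.2.2)
    | none => (0, 0)   -- unreachable: best is set on the first iteration

-- ===== PRECONDITION & SPEC =====
-- Pre_: xs must be non-empty — on an empty list the Python A raises IndexError at xs[0].
def Pre_rozle_tocki_pametno (xs : List Int) : Prop := xs ≠ []
instance (xs : List Int) : Decidable (Pre_rozle_tocki_pametno xs) := by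
  unfold Pre_rozle_tocki_pametno; infer_instance

def pvWitness_rozle_tocki_pametno : List Int := [3, 1, 4, 1, 5]

def Spec_rozle_tocki_pametno (xs : List Int) (out : Int × Int) : Prop := out = rozle_tocki_pametno_alt xs
instance (xs : List Int) (out : Int × Int) : Decidable (Spec_rozle_tocki_pametno xs out) := by unfold Spec_rozle_tocki_pametno; infer_instance

-- ===== CLAIM (what is proved, stated in full; the proofs are below) =====
def Claim_equal_rozle_tocki_pametno : Prop := ∀ (xs : List Int), Dom_rozle_tocki_pametno xs → Pre_rozle_tocki_pametno xs → Spec_rozle_tocki_pametno xs (rozle_tocki_pametno xs)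

-- ===== LEMMAS AND PROOFS =====

-- the cummin entries A's first pass appends, as a function of the remaining items and state
def cmFrom : List (Int × Int) → Int → Int → List (Int × Int)
  | [], _, _ => []
  | kx :: l, m, i =>
    let mi := if kx.2 < m then (kx.2, kx.1) else (m, i)
    mi :: cmFrom l mi.1 mi.2

-- the options A's comprehension produces, as a function of the remaining items and state
def opts : List (Int × Int) → Int → Int → List (Int × Int × Int)
  | [], _, _ => []
  | kx :: l, m, i =>
    let mi := if kx.2 < m then (kx.2, kx.1) else (m, i)
    (kx.2 - mi.1, mi.2, kx.1) :: opts l mi.1 mi.2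

-- B's best-update, on its own
def upd (b : Option (Int × Int × Int)) (c : Int × Int × Int) : Option (Int × Int × Int) :=
  match b with
  | none => some c
  | some b => if triLt b c then some c else some b

theorem foldA_cm (l : List (Int × Int)) : ∀ (m i : Int) (cm : List (Int × Int)),
    (l.foldl stepA (m, i, cm)).2.2 = cm ++ cmFrom l m i := by
  induction l with
  | nil => intro m i cm; simp [cmFrom]
  | cons kx l ih =>
    intro m i cm
    simp only [List.foldl_cons, stepA, cmFrom]
    rw [ih]
    simp

theorem zip_cm_opts (l : List (Int × Int)) : ∀ (m i : Int),
    ((l.zip (cmFrom l m i)).map (fun p => (p.1.2 - p.2.1, p.2.2, p.1.1))) = opts l m i := by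
  induction l with
  | nil => intro m i; simp [cmFrom, opts]
  | cons kx l ih =>
    intro m i
    simp only [cmFrom, opts, List.zip_cons_cons, List.map_cons]
    rw [ih]

theorem foldB_best (l : List (Int × Int)) : ∀ (m i : Int) (b : Option (Int × Int × Int)),
    (l.foldl stepB (m, i, b)).2.2 = (opts l m i).foldl upd b := by
  induction l with
  | nil => intro m i b; simp [opts]
  | cons kx l ih =>
    intro m i b
    simp only [List.foldl_cons, stepB, opts]
    rw [ih]
    rfl

theorem foldl_upd_some (l : List (Int × Int × Int)) : ∀ (a : Int × Int × Int),
    l.foldl upd (some a) = some (l.foldl (fun b c => if triLt b c then c else b) a) := by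
  induction l with
  | nil => intro a; simp
  | cons c l ih =>
    intro a
    simp only [List.foldl_cons, upd]
    split <;> rw [ih]

-- ===== VERDICT (by name: the statement is the Claim_ definition above) =====
theorem rozle_tocki_pametno_spec : Claim_equal_rozle_tocki_pametno := by
  intro xs _ hpre
  unfold Spec_rozle_tocki_pametno
  match xs with
  | [] => exact absurd rfl hpre
  | x0 :: t =>
    simp only [rozle_tocki_pametno, rozle_tocki_pametno_alt]
    rw [foldA_cm, List.nil_append, zip_cm_opts, foldB_best]
    rw [show PySem.List.enumerate (x0 :: t) = (0, x0) :: PySem.List.enumerate t 1 from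
      PySem.List.enumerate_cons ..]
    simp only [opts, List.foldl_cons, upd, foldl_upd_some]
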